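-- pv_equiv track=rewrite | github.com/gbspend/stars-solver | stars.py | get_area_clumps
-- ===== SOURCE A (Python) =====
-- def neighbors(row, col, max_size):
--     neighbors = []
--     for dr in (-1, 0, 1):
--         for dc in (-1, 0, 1):
--             # Skip the cell itself
--             if dr == 0 and dc == 0:
--                 continue
--             new_r = row + dr
--             new_c = col + dc
--             # Check bounds
--             if 0 <= new_r < max_size and 0 <= new_c < max_size:
--                 neighbors.append((new_r, new_c))
--     return neighbors
--
-- def get_area_clumps(labels, spots):
--     clumps = [] #list of clumps
--     for i in range(len(spots)):
--         curr = spots[i]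
--         foundClump = False
--         r,c = curr
--         for n in neighbors(r,c,len(labels)):
--             for cl in clumps:
--                 if n in cl:
--                     cl.append(curr)
--                     foundClump = True
--                     break
--             if foundClump:
--                 break
--         if not foundClump:
--             clumps.append([curr]) #add "seed clump"
--     return clumps
-- ===== SOURCE B (Python) =====
-- OFFSETS = ((-1, -1), (-1, 0), (-1, 1), (0, -1), (0, 1), (1, -1), (1, 0), (1, 1))
--
-- def get_area_clumps(labels, spots):
--     m = len(labels)
--     first = {}   # cell -> smallest clump label ever given to that cell
--     assign = []  # clump label of each spot, in processing order
--     n_clumps = 0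
--     for r, c in spots:
--         idx = next((first[(r + dr, c + dc)] for dr, dc in OFFSETS
--                     if 0 <= r + dr < m and 0 <= c + dc < m and (r + dr, c + dc) in first),
--                    None)
--         if idx is None:
--             idx = n_clumps
--             n_clumps += 1
--         assign.append(idx)
--         if (r, c) not in first or idx < first[(r, c)]:
--             first[(r, c)] = idx
--     out = [[] for _ in range(n_clumps)]
--     for spot, idx in zip(spots, assign):
--         out[idx].append(spot)
--     return out
-- ===== Notes on version B (the rewrite author's own statement) =====
-- stated objective: faster
-- what changed: Two staged passes instead of A's incremental clump lists: pass 1 computes an integer clump label per spot using a cell->label map over a flat offset table, pass 2 buckets the spots by label into preallocated output lists, so no clump member list is ever scanned.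
import Mathlib
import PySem

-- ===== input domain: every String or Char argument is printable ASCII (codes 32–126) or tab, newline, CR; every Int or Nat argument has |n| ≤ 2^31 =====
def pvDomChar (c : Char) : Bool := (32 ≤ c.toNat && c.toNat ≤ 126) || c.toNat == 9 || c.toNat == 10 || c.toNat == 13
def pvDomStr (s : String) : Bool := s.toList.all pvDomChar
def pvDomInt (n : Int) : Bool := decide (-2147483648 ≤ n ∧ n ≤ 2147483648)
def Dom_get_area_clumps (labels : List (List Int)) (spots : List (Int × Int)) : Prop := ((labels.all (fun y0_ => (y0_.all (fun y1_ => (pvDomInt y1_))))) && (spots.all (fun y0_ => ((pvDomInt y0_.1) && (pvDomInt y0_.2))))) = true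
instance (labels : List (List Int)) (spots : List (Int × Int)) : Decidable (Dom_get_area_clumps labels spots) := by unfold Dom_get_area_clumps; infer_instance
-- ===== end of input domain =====

-- B replaces A's incremental clump lists (scanned per neighbor) by two staged passes:
-- label every spot first via a cell -> label map, then bucket spots by label.

-- ===== PORT A =====
-- neighbors(row, col, max_size): nested loops appending in-bounds neighbor cells
def neighbors (row col max_size : Int) : List (Int × Int) :=
  ([-1, 0, 1] : List Int).foldl (fun acc dr =>
    ([-1, 0, 1] : List Int).foldl (fun acc dc =>
      if dr = 0 ∧ dc = 0 then acc
      else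
        let new_r := row + dr
        let new_c := col + dc
        if 0 ≤ new_r ∧ new_r < max_size ∧ 0 ≤ new_c ∧ new_c < max_size then
          acc ++ [(new_r, new_c)]
        else acc) acc) []

-- inner loop 'for cl in clumps: if n in cl: cl.append(curr); break' — returns the
-- updated clumps list on a hit (the in-place cl.append), none if n is in no clump
def findAttach (curr n : Int × Int) : List (List (Int × Int)) → Option (List (List (Int × Int)))
  | [] => none
  | cl :: rest =>
      if n ∈ cl then some ((cl ++ [curr]) :: rest)
      else (findAttach curr n rest).map (cl :: ·)

-- 'for n in neighbors(...): ... if foundClump: break' — first neighbor hit wins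
def stepA (m : Int) (clumps : List (List (Int × Int))) (curr : Int × Int) : List (List (Int × Int)) :=
  match (neighbors curr.1 curr.2 m).findSome? (fun n => findAttach curr n clumps) with
  | some clumps' => clumps'
  | none => clumps ++ [[curr]]

def get_area_clumps (labels : List (List Int)) (spots : List (Int × Int)) : List (List (Int × Int)) :=
  spots.foldl (stepA (labels.length : Int)) []

-- ===== PORT B =====
-- the module-level OFFSETS table
def offsets : List (Int × Int) := [(-1, -1), (-1, 0), (-1, 1), (0, -1), (0, 1), (1, -1), (1, 0), (1, 1)]

-- 'next((first[cell] for dr, dc in OFFSETS if <in bounds> and cell in first), None)'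
def firstNb (m : Int) (first : PySem.Dict (Int × Int) Int) (r c : Int) : Option Int :=
  offsets.findSome? (fun d =>
    if 0 ≤ r + d.1 ∧ r + d.1 < m ∧ 0 ≤ c + d.2 ∧ c + d.2 < m then first.get? (r + d.1, c + d.2)
    else none)

-- 'if (r, c) not in first or idx < first[(r, c)]: first[(r, c)] = idx'
def updMin (w : PySem.Dict (Int × Int) Int) (p : Int × Int) (idx : Int) : PySem.Dict (Int × Int) Int :=
  match w.get? p with
  | none => w.insert p idx
  | some old => if idx < old then w.insert p idx else w

-- 'out[idx].append(spot)' (idx is always a valid index here)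
def appendAt : List (List (Int × Int)) → Nat → (Int × Int) → List (List (Int × Int))
  | [], _, _ => []
  | cl :: rest, 0, x => (cl ++ [x]) :: rest
  | cl :: rest, j + 1, x => cl :: appendAt rest j x

-- pass 1 loop body: state = (first, assign, n_clumps)
def stepB (m : Int) (st : PySem.Dict (Int × Int) Int × List Int × Int) (p : Int × Int) :
    PySem.Dict (Int × Int) Int × List Int × Int :=
  match firstNb m st.1 p.1 p.2 with
  | none => (updMin st.1 p st.2.2, st.2.1 ++ [st.2.2], st.2.2 + 1)
  | some i => (updMin st.1 p i, st.2.1 ++ [i], st.2.2)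

def get_area_clumps_alt (labels : List (List Int)) (spots : List (Int × Int)) : List (List (Int × Int)) :=
  let m : Int := (labels.length : Int)
  let st := spots.foldl (stepB m) (PySem.Dict.empty, [], 0)
  -- pass 2: 'out = [[] for _ in range(n_clumps)]; for spot, idx in zip(spots, assign): out[idx].append(spot)'
  (spots.zip st.2.1).foldl (fun out pi => appendAt out pi.2.toNat pi.1)
    (List.replicate st.2.2.toNat [])

-- ===== PRECONDITION & SPEC =====
def Spec_get_area_clumps (labels : List (List Int)) (spots : List (Int × Int)) (out : List (List (Int × Int))) : Prop := out = get_area_clumps_alt labels spots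
instance (labels : List (List Int)) (spots : List (Int × Int)) (out : List (List (Int × Int))) : Decidable (Spec_get_area_clumps labels spots out) := by unfold Spec_get_area_clumps; infer_instance

-- ===== CLAIM (what is proved, stated in full; the proofs are below) =====
def Claim_equal_get_area_clumps : Prop := ∀ (labels : List (List Int)) (spots : List (Int × Int)), Dom_get_area_clumps labels spots → Spec_get_area_clumps labels spots (get_area_clumps labels spots)

-- ===== LEMMAS AND PROOFS =====

-- index of the first clump containing cell (what A's inner scan finds, what B's dict stores)
def firstIdx (cell : Int × Int) : List (List (Int × Int)) → Option Nat
  | [] => none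
  | cl :: rest => if cell ∈ cl then some 0 else (firstIdx cell rest).map (· + 1)

def ClumpInv (clumps : List (List (Int × Int))) (w : PySem.Dict (Int × Int) Int) : Prop :=
  ∀ cell, w.get? cell = (firstIdx cell clumps).map (fun n : Nat => (n : Int))

theorem findAttach_eq (curr n : Int × Int) (clumps : List (List (Int × Int))) :
    findAttach curr n clumps = (firstIdx n clumps).map (fun j => appendAt clumps j curr) := by
  induction clumps with
  | nil => rfl
  | cons cl rest ih =>
      by_cases h : n ∈ cl
      · simp [findAttach, firstIdx, h, appendAt]
      · simp only [findAttach, firstIdx, h, if_false, ih]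
        cases firstIdx n rest <;> simp [appendAt]

theorem findSome?_map_out {α β γ : Type} (l : List α) (f : α → Option β) (g : β → γ) :
    l.findSome? (fun x => (f x).map g) = (l.findSome? f).map g := by
  induction l with
  | nil => rfl
  | cons a l ih =>
      simp only [List.findSome?_cons]
      cases f a <;> simp [ih]

theorem inner_char (r c m dr : Int) (l : List Int) (acc : List (Int × Int)) :
    l.foldl (fun acc dc =>
      if dr = 0 ∧ dc = 0 then acc
      else
        let new_r := r + dr
        let new_c := c + dc
        if 0 ≤ new_r ∧ new_r < m ∧ 0 ≤ new_c ∧ new_c < m then acc ++ [(new_r, new_c)] else acc) acc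
    = acc ++ l.filterMap (fun dc =>
        if dr = 0 ∧ dc = 0 then none
        else if 0 ≤ r + dr ∧ r + dr < m ∧ 0 ≤ c + dc ∧ c + dc < m then some (r + dr, c + dc)
        else none) := by
  induction l generalizing acc with
  | nil => simp
  | cons a l ih =>
      simp only [List.foldl_cons, List.filterMap_cons]
      split_ifs <;> simp [ih, List.append_assoc]

theorem foldl_append_blocks {A B : Type} (l : List A) (F : A → List B) (acc : List B) :
    l.foldl (fun acc x => acc ++ F x) acc = acc ++ l.flatMap F := by
  induction l generalizing acc with
  | nil => simp
  | cons a l ih => simp [ih, List.flatMap_cons, List.append_assoc]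

theorem findSome?_filterMap' {A B C : Type} (l : List A) (g : A → Option B) (h : B → Option C) :
    (l.filterMap g).findSome? h = l.findSome? (fun x => (g x).bind h) := by
  induction l with
  | nil => rfl
  | cons a l ih =>
      cases hg : g a with
      | none => simp [hg, ih]
      | some b =>
          simp only [List.filterMap_cons, hg, List.findSome?_cons, ih, Option.bind_some]

theorem neighbors_char (r c m : Int) :
    neighbors r c m = ([-1, 0, 1] : List Int).flatMap (fun dr =>
      ([-1, 0, 1] : List Int).filterMap (fun dc =>
        if dr = 0 ∧ dc = 0 then none
        else if 0 ≤ r + dr ∧ r + dr < m ∧ 0 ≤ c + dc ∧ c + dc < m then some (r + dr, c + dc)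
        else none)) := by
  unfold neighbors
  simp only [inner_char, foldl_append_blocks, List.nil_append]

-- the same neighbor list, as a filterMap over the flat OFFSETS table
theorem neighbors_offsets (r c m : Int) :
    neighbors r c m = offsets.filterMap (fun d =>
      if 0 ≤ r + d.1 ∧ r + d.1 < m ∧ 0 ≤ c + d.2 ∧ c + d.2 < m then some (r + d.1, c + d.2)
      else none) := by
  have ho : offsets = ([-1, 0, 1] : List Int).flatMap (fun dr =>
      ([-1, 0, 1] : List Int).filterMap (fun dc =>
        if dr = 0 ∧ dc = 0 then none else some (dr, dc))) := by decide
  rw [neighbors_char, ho, List.filterMap_flatMap]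
  congr 1
  funext dr
  rw [List.filterMap_filterMap]
  congr 1
  funext dc
  by_cases h1 : dr = 0 ∧ dc = 0
  · simp [h1]
  · simp [h1]

theorem firstNb_eq (m : Int) (w : PySem.Dict (Int × Int) Int) (r c : Int) :
    firstNb m w r c = (neighbors r c m).findSome? (fun n => w.get? n) := by
  rw [neighbors_offsets, findSome?_filterMap']
  unfold firstNb
  congr 1
  funext d
  split_ifs <;> simp

theorem firstIdx_lt_length (cell : Int × Int) (clumps : List (List (Int × Int))) (j : Nat)
    (h : firstIdx cell clumps = some j) : j < clumps.length := by
  induction clumps generalizing j with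
  | nil => simp [firstIdx] at h
  | cons cl rest ih =>
      by_cases hm : cell ∈ cl
      · simp only [firstIdx, hm, if_true] at h
        simp only [Option.some.injEq] at h
        simp [List.length_cons]
        omega
      · simp only [firstIdx, hm, if_false] at h
        cases hf : firstIdx cell rest with
        | none => rw [hf] at h; simp at h
        | some i =>
            rw [hf] at h
            simp only [Option.map_some, Option.some.injEq] at h
            have := ih i hf
            simp only [List.length_cons]
            omega

theorem firstIdx_append_singleton (cell x : Int × Int) (clumps : List (List (Int × Int))) :
    firstIdx cell (clumps ++ [[x]]) =
      (match firstIdx cell clumps with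
       | some i => some i
       | none => if cell = x then some clumps.length else none) := by
  induction clumps with
  | nil => by_cases h : cell = x <;> simp [firstIdx, h]
  | cons cl rest ih =>
      simp only [List.cons_append, firstIdx]
      by_cases h : cell ∈ cl
      · simp [h]
      · simp only [h, if_false, ih]
        cases firstIdx cell rest <;> by_cases hx : cell = x <;> simp [hx]

theorem firstIdx_appendAt_ne (cell curr : Int × Int) (h : cell ≠ curr)
    (clumps : List (List (Int × Int))) (j : Nat) :
    firstIdx cell (appendAt clumps j curr) = firstIdx cell clumps := by
  induction clumps generalizing j with
  | nil => simp [appendAt]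
  | cons cl rest ih =>
      cases j with
      | zero =>
          simp only [appendAt, firstIdx]
          have : cell ∈ cl ++ [curr] ↔ cell ∈ cl := by simp [h]
          by_cases hm : cell ∈ cl <;> simp [hm, this]
      | succ j =>
          simp only [appendAt, firstIdx, ih]

theorem firstIdx_appendAt_self (curr : Int × Int) (clumps : List (List (Int × Int))) (j : Nat)
    (hj : j < clumps.length) :
    firstIdx curr (appendAt clumps j curr) =
      some (match firstIdx curr clumps with | some i => min i j | none => j) := by
  induction clumps generalizing j with
  | nil => simp at hj
  | cons cl rest ih =>
      cases j with
      | zero =>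
          simp only [appendAt, firstIdx]
          have hm : curr ∈ cl ++ [curr] := by simp
          by_cases h : curr ∈ cl
          · simp [hm, h]
          · simp only [hm, if_true, h, if_false]
            cases firstIdx curr rest <;> simp
      | succ j =>
          have hj' : j < rest.length := by simp [List.length_cons] at hj; omega
          by_cases h : curr ∈ cl
          · simp [appendAt, firstIdx, h]
          · simp only [appendAt, firstIdx, h, if_false, ih j hj']
            cases firstIdx curr rest <;> simp [Nat.succ_min_succ]

theorem get?_updMin_ne (w : PySem.Dict (Int × Int) Int) (p q : Int × Int) (idx : Int)
    (h : q ≠ p) : (updMin w p idx).get? q = w.get? q := by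
  unfold updMin
  cases hg : w.get? p with
  | none => simp [PySem.Dict.get?_insert, h]
  | some old => by_cases hlt : idx < old <;> simp [hlt, PySem.Dict.get?_insert, h]

theorem get?_updMin_self (w : PySem.Dict (Int × Int) Int) (p : Int × Int) (idx : Int) :
    (updMin w p idx).get? p =
      some (match w.get? p with | none => idx | some old => if idx < old then idx else old) := by
  unfold updMin
  cases hg : w.get? p with
  | none => simp
  | some old => by_cases hlt : idx < old <;> simp [hlt, hg]

-- stepA characterized through firstIdx
theorem stepA_char (m : Int) (clumps : List (List (Int × Int))) (curr : Int × Int) :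
    stepA m clumps curr =
      match (neighbors curr.1 curr.2 m).findSome? (fun n => firstIdx n clumps) with
      | some j => appendAt clumps j curr
      | none => clumps ++ [[curr]] := by
  unfold stepA
  simp only [findAttach_eq]
  rw [findSome?_map_out]
  cases (neighbors curr.1 curr.2 m).findSome? (fun n => firstIdx n clumps) <;> rfl

-- B's lookup through the invariant
theorem firstNb_inv (m : Int) (clumps : List (List (Int × Int))) (w : PySem.Dict (Int × Int) Int)
    (h : ClumpInv clumps w) (r c : Int) :
    firstNb m w r c = ((neighbors r c m).findSome? (fun n => firstIdx n clumps)).map (fun n : Nat => (n : Int)) := by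
  rw [firstNb_eq]
  have h' : ∀ cell, w.get? cell = (firstIdx cell clumps).map (fun n : Nat => (n : Int)) := h
  simp only [h']
  rw [findSome?_map_out]

-- invariant preservation
theorem inv_none (m : Int) (clumps : List (List (Int × Int))) (w : PySem.Dict (Int × Int) Int)
    (curr : Int × Int) (h : ClumpInv clumps w)
    (hJ : (neighbors curr.1 curr.2 m).findSome? (fun n => firstIdx n clumps) = none) :
    ClumpInv (clumps ++ [[curr]]) (updMin w curr (clumps.length : Int)) := by
  intro cell
  by_cases hc : cell = curr
  · subst hc
    rw [get?_updMin_self, firstIdx_append_singleton]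
    cases hf : firstIdx cell clumps with
    | none => rw [h cell, hf]; simp
    | some i =>
        rw [h cell, hf]
        have hi : i < clumps.length := firstIdx_lt_length cell clumps i hf
        have hlt : ¬ ((clumps.length : Int) < (i : Int)) := by omega
        simp [hlt]
  · rw [get?_updMin_ne _ _ _ _ hc, h cell, firstIdx_append_singleton]
    cases firstIdx cell clumps with
    | none => simp [hc]
    | some i => simp

theorem inv_some (m : Int) (clumps : List (List (Int × Int))) (w : PySem.Dict (Int × Int) Int)
    (curr : Int × Int) (j : Nat) (h : ClumpInv clumps w) (hj : j < clumps.length) :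
    ClumpInv (appendAt clumps j curr) (updMin w curr ((j : Nat) : Int)) := by
  intro cell
  by_cases hc : cell = curr
  · subst hc
    rw [get?_updMin_self, firstIdx_appendAt_self cell clumps j hj]
    cases hf : firstIdx cell clumps with
    | none => rw [h cell, hf]; simp
    | some i =>
        rw [h cell, hf]
        by_cases hij : j < i
        · have h1 : ((j : Nat) : Int) < ((i : Nat) : Int) := by omega
          have h2 : min i j = j := by omega
          simp [h1, h2]
        · have h1 : ¬ (((j : Nat) : Int) < ((i : Nat) : Int)) := by omega
          have h2 : min i j = i := by omega
          simp [h1, h2]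
  · rw [get?_updMin_ne _ _ _ _ hc, h cell, firstIdx_appendAt_ne cell curr hc clumps j]

-- the labels pass 1 records, and the number of fresh clumps it opens
def assignOf (m : Int) : List (Int × Int) → PySem.Dict (Int × Int) Int → Int → List Int
  | [], _, _ => []
  | p :: rest, w, n =>
    match firstNb m w p.1 p.2 with
    | none => n :: assignOf m rest (updMin w p n) (n + 1)
    | some i => i :: assignOf m rest (updMin w p i) n

def seedsOf (m : Int) : List (Int × Int) → PySem.Dict (Int × Int) Int → Int → Nat
  | [], _, _ => 0
  | p :: rest, w, n =>
    match firstNb m w p.1 p.2 with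
    | none => seedsOf m rest (updMin w p n) (n + 1) + 1
    | some i => seedsOf m rest (updMin w p i) n

theorem pass1_eq (m : Int) (spots : List (Int × Int)) :
    ∀ (w : PySem.Dict (Int × Int) Int) (acc : List Int) (n : Int),
      (spots.foldl (stepB m) (w, acc, n)).2.1 = acc ++ assignOf m spots w n ∧
      (spots.foldl (stepB m) (w, acc, n)).2.2 = n + ((seedsOf m spots w n : Nat) : Int) := by
  induction spots with
  | nil => intro w acc n; simp [assignOf, seedsOf]
  | cons p rest ih =>
      intro w acc n
      simp only [List.foldl_cons, stepB, assignOf, seedsOf]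
      cases hF : firstNb m w p.1 p.2 with
      | none =>
          obtain ⟨h1, h2⟩ := ih (updMin w p n) (acc ++ [n]) (n + 1)
          refine ⟨by rw [h1]; simp, by rw [h2]; push_cast; ring⟩
      | some i =>
          obtain ⟨h1, h2⟩ := ih (updMin w p i) (acc ++ [i]) n
          exact ⟨by rw [h1]; simp, by rw [h2]⟩

theorem appendAt_length (xs : List (List (Int × Int))) (j : Nat) (x : Int × Int) :
    (appendAt xs j x).length = xs.length := by
  induction xs generalizing j with
  | nil => rfl
  | cons cl rest ih => cases j <;> simp [appendAt, ih]

theorem appendAt_append_lt (xs ys : List (List (Int × Int))) (j : Nat) (x : Int × Int)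
    (h : j < xs.length) : appendAt (xs ++ ys) j x = appendAt xs j x ++ ys := by
  induction xs generalizing j with
  | nil => simp at h
  | cons cl rest ih =>
      cases j with
      | zero => simp [appendAt]
      | succ j =>
          have : j < rest.length := by simp at h; omega
          simp [appendAt, ih j this]

theorem appendAt_at_length (xs : List (List (Int × Int))) (cl : List (Int × Int))
    (ys : List (List (Int × Int))) (x : Int × Int) :
    appendAt (xs ++ cl :: ys) xs.length x = xs ++ (cl ++ [x]) :: ys := by
  induction xs with
  | nil => simp [appendAt]
  | cons a xs ih => simp [appendAt, ih]

-- main correspondence: pass 2 over pass 1's labels reproduces A's incremental fold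
theorem main_eq (m : Int) (spots : List (Int × Int)) :
    ∀ (clumps : List (List (Int × Int))) (w : PySem.Dict (Int × Int) Int),
      ClumpInv clumps w →
      (spots.zip (assignOf m spots w (clumps.length : Int))).foldl
          (fun out pi => appendAt out pi.2.toNat pi.1)
          (clumps ++ List.replicate (seedsOf m spots w (clumps.length : Int)) [])
        = spots.foldl (stepA m) clumps := by
  induction spots with
  | nil => intro clumps w _; simp [assignOf, seedsOf]
  | cons p rest ih =>
      intro clumps w h
      have hF := firstNb_inv m clumps w h p.1 p.2
      simp only [assignOf, seedsOf, List.foldl_cons]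
      cases hJ : (neighbors p.1 p.2 m).findSome? (fun n => firstIdx n clumps) with
      | none =>
          rw [hJ] at hF
          simp only [hF, Option.map_none]
          rw [stepA_char, hJ]
          simp only [List.replicate_succ, List.zip_cons_cons, List.foldl_cons]
          have ht : ((clumps.length : Int)).toNat = clumps.length := Int.toNat_natCast _
          rw [ht, appendAt_at_length]
          have hlen : ((clumps ++ [[p]]).length : Int) = (clumps.length : Int) + 1 := by
            simp
          have := ih (clumps ++ [[p]]) (updMin w p (clumps.length : Int))
            (inv_none m clumps w p h hJ)
          rw [hlen] at this
          simpa using this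
      | some j =>
          rw [hJ] at hF
          simp only [hF, Option.map_some]
          rw [stepA_char, hJ]
          obtain ⟨nb, _, hnb⟩ := List.exists_of_findSome?_eq_some hJ
          have hjlt : j < clumps.length := firstIdx_lt_length nb clumps j hnb
          simp only [List.zip_cons_cons, List.foldl_cons]
          have ht : ((j : Nat) : Int).toNat = j := Int.toNat_natCast j
          rw [ht, appendAt_append_lt _ _ _ _ hjlt]
          have hlen : ((appendAt clumps j p).length : Int) = (clumps.length : Int) := by
            rw [appendAt_length]
          have := ih (appendAt clumps j p) (updMin w p ((j : Nat) : Int))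
            (inv_some m clumps w p j h hjlt)
          rw [hlen] at this
          exact this

-- ===== VERDICT (by name: the statement is the Claim_ definition above) =====
theorem get_area_clumps_spec : Claim_equal_get_area_clumps := by
  intro labels spots _
  unfold Spec_get_area_clumps get_area_clumps get_area_clumps_alt
  obtain ⟨h1, h2⟩ := pass1_eq (labels.length : Int) spots PySem.Dict.empty [] 0
  simp only [h1, h2, List.nil_append]
  have hinv : ClumpInv [] PySem.Dict.empty := by
    intro cell; rw [PySem.Dict.get?_empty]; rfl
  have hmain := main_eq (labels.length : Int) spots [] PySem.Dict.empty hinv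
  simp only [List.length_nil, Int.natCast_zero, List.nil_append] at hmain
  rw [← hmain]
  norm_num [Int.toNat_natCast]
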